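-- pv_equiv track=rewrite | github.com/ruiwynt/python-repo | comp3027/ikea.py | distribute_median
-- ===== SOURCE A (Python) =====
-- width = lambda x: x[2]
--
-- def sorted_insert(src, target):
--     i = 0
--     j = 0
--     while i < len(src):
--         if j == len(target):
--             target.append(src[i])
--         else:
--             while j < len(target) and width(src[i]) > width(target[j]):
--                 j += 1
--             if j == len(target):
--                 target.append(src[i])
--             else:
--                 target.insert(j, src[i])
--         i += 1
--
-- def distribute_median(al, ar, am):
--     if len(am) > 0:
--         aml = []
--         amr = []
--         diff = abs(len(ar) - len(al))
--         cutoff = min(len(am), diff)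
--         if len(ar) > len(al):
--             aml = am[:cutoff]
--         else:
--             amr = am[:cutoff]
--         am = am[cutoff:]
--         while len(am) > 0:
--             if len(aml) > len(amr):
--                 amr.append(am.pop(0))
--             else:
--                 aml.append(am.pop(0))
--         sorted_insert(al, aml)
--         sorted_insert(ar, amr)
--         return aml, amr
--     return al, ar
-- ===== SOURCE B (Python) =====
-- def _merge(src, target):
--     # linear stack merge: pop smaller-width items of the remaining target past s,
--     # then push s so later src items compare against it first
--     stack = target[::-1]
--     out = []
--     for s in src:
--         while stack and s[2] > stack[-1][2]:
--             out.append(stack.pop())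
--         stack.append(s)
--     out.extend(reversed(stack))
--     return out
--
-- def distribute_median(al, ar, am):
--     if not am:
--         return al, ar
--     c = min(len(am), abs(len(ar) - len(al)))
--     rem = am[c:]
--     if len(ar) > len(al):
--         aml = am[:c] + rem[c::2]
--         amr = rem[:c] + rem[c + 1::2]
--     else:
--         aml = rem[:c] + rem[c::2]
--         amr = am[:c] + rem[c + 1::2]
--     return _merge(al, aml), _merge(ar, amr)
-- ===== Notes on version B (the rewrite author's own statement) =====
-- stated objective: alternative
-- what changed: replaces the in-place insert/pop(0) distribution and persistent-index insertion merge with a closed-form slice distribution and a stack-based merge that builds new lists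
-- outside the precondition, e.g. on distribute_median([], [[1]], [[0, 0, 5]]): A returns ([[0, 0, 5]], [[1]]), B returns ([[0, 0, 5]], [[1]])
import Mathlib
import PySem

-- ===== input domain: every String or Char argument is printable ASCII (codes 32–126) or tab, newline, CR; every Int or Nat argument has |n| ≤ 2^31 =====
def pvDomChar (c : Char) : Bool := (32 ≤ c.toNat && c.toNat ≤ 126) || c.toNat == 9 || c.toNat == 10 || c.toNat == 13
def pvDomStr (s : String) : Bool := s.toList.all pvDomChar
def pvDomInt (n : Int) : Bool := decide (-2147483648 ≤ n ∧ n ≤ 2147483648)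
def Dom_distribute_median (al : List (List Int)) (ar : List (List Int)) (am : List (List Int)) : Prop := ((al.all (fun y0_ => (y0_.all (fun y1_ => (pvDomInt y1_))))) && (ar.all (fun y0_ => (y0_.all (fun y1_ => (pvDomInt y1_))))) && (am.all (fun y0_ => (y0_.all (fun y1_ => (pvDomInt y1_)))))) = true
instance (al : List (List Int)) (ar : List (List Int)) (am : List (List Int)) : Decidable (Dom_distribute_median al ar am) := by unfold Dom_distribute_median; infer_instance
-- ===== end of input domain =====

-- ===== PORT A =====
-- B changes: closed-form slice distribution + stack-based merge into new lists instead of in-place insert/pop(0) (objective: alternative).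
-- width x = x[2]; exact (= Python's x[2]) whenever 3 ≤ x.length, which Pre_ guarantees for every accessed element;
-- Python raises IndexError where pyGet? is none, excluded by Pre_.
def pyWidth (x : List Int) : Int := (PySem.List.pyGet? x 2).getD 0

-- inner 'while j < len(target) and width(src[i]) > width(target[j]): j += 1'
def siScan (s : List Int) (target : List (List Int)) (j : Nat) : Nat :=
  if h : j < target.length then
    if pyWidth s > pyWidth target[j] then siScan s target (j + 1) else j
  else j
termination_by target.length - j

-- outer while of sorted_insert: i walks src, j persists across iterations; target mutations become a new list
def siLoop (src : List (List Int)) (target : List (List Int)) (j : Nat) : List (List Int) :=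
  match src with
  | [] => target
  | s :: rest =>
      if j = target.length then siLoop rest (target ++ [s]) j
      else
        let j' := siScan s target j
        if j' = target.length then siLoop rest (target ++ [s]) j'
        else siLoop rest (PySem.List.insert target (j' : Int) s) j'

def sorted_insert (src target : List (List Int)) : List (List Int) := siLoop src target 0

-- 'while len(am) > 0: ... am.pop(0)' distribution loop
def distMedLoop (am aml amr : List (List Int)) : List (List Int) × List (List Int) :=
  match am with
  | [] => (aml, amr)
  | x :: rest =>
      if aml.length > amr.length then distMedLoop rest aml (amr ++ [x])
      else distMedLoop rest (aml ++ [x]) amr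

def distribute_median (al : List (List Int)) (ar : List (List Int)) (am : List (List Int)) : List (List Int) × List (List Int) :=
  if am.length > 0 then
    let diff : Nat := ((ar.length : Int) - (al.length : Int)).natAbs
    let cutoff : Nat := min am.length diff
    let aml : List (List Int) := if ar.length > al.length then PySem.List.slice am none (some (cutoff : Int)) else []
    let amr : List (List Int) := if ar.length > al.length then [] else PySem.List.slice am none (some (cutoff : Int))
    let am2 : List (List Int) := PySem.List.slice am (some (cutoff : Int)) none
    let p := distMedLoop am2 aml amr
    (sorted_insert al p.1, sorted_insert ar p.2)
  else (al, ar)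

-- ===== PORT B =====
-- rem[c::2] for c >= 0: every second element; hand port of the step-2 slice, exact for the nonnegative starts Source B uses
def evens {A : Type} : List A → List A
  | [] => []
  | [x] => [x]
  | x :: _ :: xs => x :: evens xs

-- the Python stack holds the remaining target reversed (top = last); we keep it top-first, so reversals compose away
def popWhile (s : List Int) (out stack : List (List Int)) : List (List Int) × List (List Int) :=
  match stack with
  | [] => (out, [])
  | t :: ts => if pyWidth s > pyWidth t then popWhile s (out ++ [t]) ts else (out, t :: ts)

def mergeGo (src out stack : List (List Int)) : List (List Int) :=
  match src with
  | [] => out ++ stack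
  | s :: rest =>
      let p := popWhile s out stack
      mergeGo rest p.1 (s :: p.2)

def mergeB (src target : List (List Int)) : List (List Int) := mergeGo src [] target

def distribute_median_alt (al : List (List Int)) (ar : List (List Int)) (am : List (List Int)) : List (List Int) × List (List Int) :=
  match am with
  | [] => (al, ar)
  | _ =>
    let c : Nat := min am.length ((ar.length : Int) - (al.length : Int)).natAbs
    let rem : List (List Int) := am.drop c
    let aml : List (List Int) :=
      if ar.length > al.length then am.take c ++ evens (rem.drop c)
      else rem.take c ++ evens (rem.drop c)
    let amr : List (List Int) :=
      if ar.length > al.length then rem.take c ++ evens (rem.drop (c + 1))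
      else am.take c ++ evens (rem.drop (c + 1))
    (mergeB al aml, mergeB ar amr)

-- ===== PRECONDITION & SPEC =====
-- Pre_ excludes inputs where am is nonempty and some element of al/ar/am is shorter than 3: the width lookup x[2]
-- raises IndexError there (on a few such inputs A happens never to touch the short element and returns; B agrees there).
def Pre_distribute_median (al : List (List Int)) (ar : List (List Int)) (am : List (List Int)) : Prop :=
  am = [] ∨ ∀ x ∈ al ++ ar ++ am, 3 ≤ x.length
instance (al : List (List Int)) (ar : List (List Int)) (am : List (List Int)) : Decidable (Pre_distribute_median al ar am) := by unfold Pre_distribute_median; infer_instance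

def pvWitness_distribute_median : List (List Int) × List (List Int) × List (List Int) :=
  ([[1, 2, 3]], [[4, 5, 6], [7, 8, 9]], [[0, 0, 2]])

def Spec_distribute_median (al : List (List Int)) (ar : List (List Int)) (am : List (List Int)) (out : List (List Int) × List (List Int)) : Prop := out = distribute_median_alt al ar am
instance (al : List (List Int)) (ar : List (List Int)) (am : List (List Int)) (out : List (List Int) × List (List Int)) : Decidable (Spec_distribute_median al ar am out) := by unfold Spec_distribute_median; infer_instance

-- ===== CLAIM (what is proved, stated in full; the proofs are below) =====
def Claim_equal_distribute_median : Prop := ∀ (al : List (List Int)) (ar : List (List Int)) (am : List (List Int)), Dom_distribute_median al ar am → Pre_distribute_median al ar am → Spec_distribute_median al ar am (distribute_median al ar am)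

-- ===== LEMMAS AND PROOFS =====

lemma evens_cons (x : List Int) (l : List (List Int)) : evens (x :: l) = x :: evens (l.drop 1) := by
  cases l <;> simp [evens]

lemma evens_eq (l : List (List Int)) : evens l = l.take 1 ++ evens (l.drop 2) := by
  cases l with
  | nil => simp [evens]
  | cons x t => cases t <;> simp [evens]

-- distribution loop characterisation: from a deficit k the shorter side is topped up, then items alternate
lemma distLoop_both (rem : List (List Int)) : ∀ aml amr : List (List Int),
    (∀ k, amr.length = aml.length + k →
      distMedLoop rem aml amr = (aml ++ rem.take k ++ evens (rem.drop k), amr ++ evens (rem.drop (k + 1))))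
    ∧ (∀ k, aml.length = amr.length + (k + 1) →
      distMedLoop rem aml amr = (aml ++ evens (rem.drop (k + 1)), amr ++ rem.take (k + 1) ++ evens (rem.drop (k + 2)))) := by
  induction rem with
  | nil => intro aml amr; constructor <;> intro k hk <;> simp [distMedLoop, evens]
  | cons x rest ih =>
      intro aml amr
      constructor
      · intro k hk
        have hc : ¬ aml.length > amr.length := by omega
        rw [show distMedLoop (x :: rest) aml amr = distMedLoop rest (aml ++ [x]) amr from by
          simp [distMedLoop, hc]]
        cases k with
        | zero =>
            rw [(ih (aml ++ [x]) amr).2 0 (by simp at hk ⊢; omega)]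
            refine Prod.ext ?_ ?_ <;> simp [evens_cons]
            rw [evens_eq rest]
        | succ k2 =>
            rw [(ih (aml ++ [x]) amr).1 k2 (by simp at hk ⊢; omega)]
            simp
      · intro k hk
        have hc : aml.length > amr.length := by omega
        rw [show distMedLoop (x :: rest) aml amr = distMedLoop rest aml (amr ++ [x]) from by
          simp [distMedLoop, hc]]
        cases k with
        | zero =>
            rw [(ih aml (amr ++ [x])).1 0 (by simp at hk ⊢; omega)]
            simp
        | succ k2 =>
            rw [(ih aml (amr ++ [x])).2 k2 (by simp at hk ⊢; omega)]
            simp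

-- popWhile factors its accumulator
lemma popWhile_out (s : List Int) (out stack : List (List Int)) :
    popWhile s out stack = (out ++ (popWhile s [] stack).1, (popWhile s [] stack).2) := by
  induction stack generalizing out with
  | nil => simp [popWhile]
  | cons t ts ih =>
      simp only [popWhile]
      by_cases h : pyWidth s > pyWidth t
      · simp only [if_pos h]; rw [ih (out ++ [t]), ih ([] ++ [t])]; simp
      · simp [if_neg h]

-- mergeGo factors its accumulator
lemma mergeGo_out (src : List (List Int)) : ∀ out stack : List (List Int),
    mergeGo src out stack = out ++ mergeGo src [] stack := by
  induction src with
  | nil => intro out stack; simp [mergeGo]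
  | cons s rest ih =>
      intro out stack
      simp only [mergeGo]
      rw [popWhile_out s out stack]
      rw [ih (out ++ (popWhile s [] stack).1) (s :: (popWhile s [] stack).2),
          ih (popWhile s [] stack).1 (s :: (popWhile s [] stack).2)]
      simp

lemma siScan_ge (s : List Int) (target : List (List Int)) (j : Nat) : j ≤ siScan s target j := by
  fun_induction siScan s target j <;> omega

lemma siScan_le (s : List Int) (target : List (List Int)) (j : Nat) (h : j ≤ target.length) :
    siScan s target j ≤ target.length := by
  fun_induction siScan s target j <;> omega

lemma popWhile_drop (s : List Int) (T : List (List Int)) (j : Nat) (h : j ≤ T.length) :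
    popWhile s [] (T.drop j) = ((T.drop j).take (siScan s T j - j), T.drop (siScan s T j)) := by
  have main : ∀ n j, T.length - j ≤ n → j ≤ T.length →
      popWhile s [] (T.drop j) = ((T.drop j).take (siScan s T j - j), T.drop (siScan s T j)) := by
    intro n
    induction n with
    | zero =>
        intro j hn hj
        have hj' : j = T.length := by omega
        subst hj'
        rw [siScan]
        simp [popWhile]
    | succ n ihn =>
        intro j hn hj
        by_cases h1 : j < T.length
        · have hdrop : T.drop j = T[j] :: T.drop (j + 1) := List.drop_eq_getElem_cons h1
          rw [siScan, dif_pos h1]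
          by_cases hw : pyWidth s > pyWidth T[j]
          · rw [if_pos hw, hdrop]
            simp only [popWhile, if_pos hw]
            rw [popWhile_out s ([] ++ [T[j]]) (T.drop (j + 1))]
            rw [ihn (j + 1) (by omega) (by omega)]
            have hge := siScan_ge s T (j + 1)
            refine Prod.ext ?_ rfl
            simp only []
            have : siScan s T (j + 1) - j = (siScan s T (j + 1) - (j + 1)) + 1 := by omega
            rw [this, List.take_succ_cons]
            simp
          · rw [if_neg hw, hdrop]
            simp [popWhile, hw, ← hdrop]
        · have hj' : j = T.length := by omega
          subst hj'
          rw [siScan]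
          simp [popWhile]
  exact main (T.length - j) j le_rfl h

-- main invariant: A's persistent-j insertion loop emits B's stack merge
lemma siLoop_eq (src : List (List Int)) : ∀ (T : List (List Int)) (j : Nat), j ≤ T.length →
    siLoop src T j = T.take j ++ mergeGo src [] (T.drop j) := by
  induction src with
  | nil => intro T j h; simp [siLoop, mergeGo]
  | cons s rest ih =>
      intro T j h
      by_cases he : j = T.length
      · rw [show siLoop (s :: rest) T j = siLoop rest (T ++ [s]) j from by simp [siLoop, he]]
        rw [ih (T ++ [s]) j (by simp; omega)]
        rw [show mergeGo (s :: rest) [] (T.drop j) = mergeGo rest [] [s] from by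
          subst he; simp [mergeGo, List.drop_length, popWhile]]
        subst he
        rw [List.take_append_of_le_length le_rfl, List.drop_append_of_le_length le_rfl]
        simp [List.drop_length]
      · have h1 : j < T.length := by omega
        have hge := siScan_ge s T j
        have hle := siScan_le s T j h
        have hB : mergeGo (s :: rest) [] (T.drop j)
            = (T.drop j).take (siScan s T j - j) ++ mergeGo rest [] (s :: T.drop (siScan s T j)) := by
          simp only [mergeGo]
          rw [popWhile_drop s T j h]
          rw [mergeGo_out rest _ _]
        have hsplit : T.take (siScan s T j) = T.take j ++ (T.drop j).take (siScan s T j - j) := by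
          rw [show siScan s T j = j + (siScan s T j - j) from by omega, List.take_add]
          simp
        by_cases h2 : siScan s T j = T.length
        · rw [show siLoop (s :: rest) T j = siLoop rest (T ++ [s]) (siScan s T j) from by
            simp only [siLoop, if_neg he, if_pos h2]]
          rw [ih (T ++ [s]) (siScan s T j) (by simp; omega)]
          rw [hB, h2]
          have e1 : (T ++ [s]).take T.length = T := by simp
          have e2 : (T ++ [s]).drop T.length = [s] := by simp
          have e3 : (T.drop j).take (T.length - j) = T.drop j := List.take_of_length_le (by simp)
          rw [e1, e2, e3, List.drop_length, ← List.append_assoc, List.take_append_drop]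
        · have h2' : siScan s T j < T.length := by omega
          rw [show siLoop (s :: rest) T j
              = siLoop rest (PySem.List.insert T ((siScan s T j : Nat) : Int) s) (siScan s T j) from by
            simp only [siLoop, if_neg he, if_neg h2]]
          rw [PySem.List.insert_natCast T (siScan s T j) s hle]
          rw [ih _ (siScan s T j) (by simp; omega)]
          rw [hB]
          have hlt : (T.take (siScan s T j)).length = siScan s T j := by
            simp; omega
          rw [show ((T.take (siScan s T j) ++ s :: T.drop (siScan s T j)).take (siScan s T j))
              = T.take (siScan s T j) from by
            rw [List.take_append_of_le_length (by omega)]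
            simp [List.take_take]]
          rw [show ((T.take (siScan s T j) ++ s :: T.drop (siScan s T j)).drop (siScan s T j))
              = s :: T.drop (siScan s T j) from by
            rw [List.drop_append_of_le_length (by omega)]
            simp]
          rw [hsplit]
          simp

lemma sorted_insert_eq_mergeB (src target : List (List Int)) :
    sorted_insert src target = mergeB src target := by
  have h := siLoop_eq src target 0 (Nat.zero_le _)
  simpa [sorted_insert, mergeB] using h

-- ===== VERDICT (by name: the statement is the Claim_ definition above) =====
theorem distribute_median_spec : Claim_equal_distribute_median := by
  unfold Claim_equal_distribute_median
  intro al ar am _ _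
  unfold Spec_distribute_median
  cases am with
  | nil => simp [distribute_median, distribute_median_alt]
  | cons a0 amt =>
      simp only [distribute_median, distribute_median_alt]
      rw [if_pos (by simp)]
      set c := min (a0 :: amt).length ((ar.length : Int) - (al.length : Int)).natAbs with hc
      have hcle : c ≤ (a0 :: amt).length := min_le_left _ _
      rw [PySem.List.slice_from_natCast]
      have hlen : ((a0 :: amt).take c).length = c := by
        rw [List.length_take]; exact Nat.min_eq_left hcle
      by_cases hlr : ar.length > al.length
      · simp only [if_pos hlr]
        rw [PySem.List.slice_to_natCast]
        rcases Nat.eq_zero_or_pos c with h0 | hpos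
        · rw [(distLoop_both ((a0 :: amt).drop c) ((a0 :: amt).take c) []).1 0 (by simp [h0])]
          simp [h0, sorted_insert_eq_mergeB]
        · rw [(distLoop_both ((a0 :: amt).drop c) ((a0 :: amt).take c) []).2 (c - 1) (by simp [hlen]; omega)]
          rw [show c - 1 + 1 = c from by omega, show c - 1 + 2 = c + 1 from by omega]
          simp [sorted_insert_eq_mergeB]
      · simp only [if_neg hlr]
        rw [PySem.List.slice_to_natCast]
        rw [(distLoop_both ((a0 :: amt).drop c) [] ((a0 :: amt).take c)).1 c (by simpa using hlen)]
        simp [sorted_insert_eq_mergeB]
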